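-- pv_equiv track=rewrite | github.com/Wendy-Xiao/summ_guided_disco_parser | build_gt_tree.py | map_disco_to_sent
-- ===== SOURCE A (Python) =====
-- def map_disco_to_sent(disco_span):
--     map_to_sent = [0 for _ in range(len(disco_span))]
--     curret_sent = 0
--     current_idx = 1
--     for idx, disco in enumerate(disco_span):
--         if disco[0] == current_idx:
--             map_to_sent[idx] = curret_sent
--         else:
--             curret_sent += 1
--             map_to_sent[idx] = curret_sent
--         current_idx = disco[1]
--     return map_to_sent
-- ===== SOURCE B (Python) =====
-- def map_disco_to_sent(disco_span):
--     # Segment the spans: collect the cut positions (indices whose span does not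
--     # start where the previous span ended, position 0 compared against 1), then
--     # emit each inter-cut block as a constant run of its segment number.
--     prev_ends = [1] + [e for _, e in disco_span[:-1]]
--     cuts = [i for i, ((s, _), p) in enumerate(zip(disco_span, prev_ends)) if s != p]
--     bounds = [0] + cuts + [len(disco_span)]
--     out = []
--     for k, (lo, hi) in enumerate(zip(bounds, bounds[1:])):
--         out += [k] * (hi - lo)
--     return out
-- ===== Notes on version B (the rewrite author's own statement) =====
-- stated objective: alternative
-- what changed: Instead of A's stateful element-by-element loop carrying a running sentence counter, B segments the input globally: it collects the cut positions where a span does not continue the previous span, and then emits the output as constant blocks (one replicated run of each segment number between consecutive cut boundaries).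
import Mathlib
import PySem

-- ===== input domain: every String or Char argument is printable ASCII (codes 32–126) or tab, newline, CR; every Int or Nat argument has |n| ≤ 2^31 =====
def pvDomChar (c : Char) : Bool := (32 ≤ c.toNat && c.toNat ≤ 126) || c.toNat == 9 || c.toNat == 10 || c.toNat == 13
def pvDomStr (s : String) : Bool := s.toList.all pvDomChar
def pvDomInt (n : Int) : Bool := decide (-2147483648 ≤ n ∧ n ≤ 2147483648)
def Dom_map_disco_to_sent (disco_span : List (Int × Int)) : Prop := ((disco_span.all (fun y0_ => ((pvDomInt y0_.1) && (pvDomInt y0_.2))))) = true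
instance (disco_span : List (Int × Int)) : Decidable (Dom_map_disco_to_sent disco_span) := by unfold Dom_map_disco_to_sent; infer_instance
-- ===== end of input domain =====

-- B segments the input into cut-delimited blocks and emits replicated constant runs, instead of A's stateful per-element counter loop (same cost, different algorithmic decomposition).


-- ===== PORT A =====
-- literal port: preallocated zero list, loop over enumerate mutating it via List.set,
-- carrying (map_to_sent, curret_sent, current_idx)
def map_disco_to_sent (disco_span : List (Int × Int)) : List Int :=
  let init : List Int := List.replicate disco_span.length 0
  let st := (PySem.List.enumerate disco_span).foldl
    (fun (st : List Int × Int × Int) (p : Int × (Int × Int)) =>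
      let m := st.1; let cs := st.2.1; let ci := st.2.2
      let idx := p.1; let disco := p.2
      if disco.1 == ci then (m.set idx.toNat cs, cs, disco.2)
      else (m.set idx.toNat (cs + 1), cs + 1, disco.2))
    (init, 0, 1)
  st.1

-- ===== PORT B =====
-- cuts: enumerate+filter+map over zip with previous ends; bounds: 0 :: cuts ++ [n];
-- output: fold over enumerate(zip(bounds, bounds[1:])) appending replicated blocks
-- ([k]*(hi-lo) with Python's negative-repeat-is-empty = Int.toNat clamping;
-- bounds[1:] = List.drop 1, exact since slicing from 1 drops the first element).
def map_disco_to_sent_alt (disco_span : List (Int × Int)) : List Int :=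
  let prevEnds : List Int := 1 :: disco_span.dropLast.map (·.2)
  let cuts : List Int :=
    ((PySem.List.enumerate (disco_span.zip prevEnds)).filter
      (fun p => p.2.1.1 != p.2.2)).map (·.1)
  let bounds : List Int := 0 :: cuts ++ [(disco_span.length : Int)]
  (PySem.List.enumerate (bounds.zip (bounds.drop 1))).foldl
    (fun (out : List Int) (p : Int × (Int × Int)) =>
      out ++ List.replicate (p.2.2 - p.2.1).toNat p.1) []

-- ===== PRECONDITION & SPEC =====
def Spec_map_disco_to_sent (disco_span : List (Int × Int)) (out : List Int) : Prop := out = map_disco_to_sent_alt disco_span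
instance (disco_span : List (Int × Int)) (out : List Int) : Decidable (Spec_map_disco_to_sent disco_span out) := by unfold Spec_map_disco_to_sent; infer_instance

-- ===== CLAIM (what is proved, stated in full; the proofs are below) =====
def Claim_equal_map_disco_to_sent : Prop := ∀ (disco_span : List (Int × Int)), Dom_map_disco_to_sent disco_span → Spec_map_disco_to_sent disco_span (map_disco_to_sent disco_span)

-- ===== LEMMAS AND PROOFS =====

-- common reference: the sentence-index list as direct recursion over (counter, previous end)
def pvG : List (Int × Int) → Int → Int → List Int
  | [], _, _ => []
  | d :: t, cs, ci =>
      let cs' := if d.1 == ci then cs else cs + 1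
      cs' :: pvG t cs' d.2

-- sequential writes of a list into m starting at position k
def pvOverwrite (m : List Int) (k : Nat) : List Int → List Int
  | [] => m
  | x :: xs => pvOverwrite (m.set k x) (k + 1) xs

-- cut positions of l given previous end ci, counting from k
def pvCuts : List (Int × Int) → Int → Int → List Int
  | [], _, _ => []
  | d :: t, ci, k => if d.1 == ci then pvCuts t d.2 (k + 1) else k :: pvCuts t d.2 (k + 1)

-- blocks: replicate (b-a) copies of the running label over consecutive bounds
def pvJoin : List Int → Int → List Int
  | a :: b :: rest, k => List.replicate (b - a).toNat k ++ pvJoin (b :: rest) (k + 1)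
  | _, _ => []

theorem pvOverwrite_fill (l : List (Int × Int)) (cs ci : Int) :
    ∀ pre : List Int, pvOverwrite (pre ++ List.replicate l.length 0) pre.length (pvG l cs ci) = pre ++ pvG l cs ci := by
  induction l generalizing cs ci with
  | nil => intro pre; simp [pvG, pvOverwrite]
  | cons d t ih =>
    intro pre
    simp only [pvG, pvOverwrite, List.length_cons, List.replicate_succ]
    have hset : (pre ++ (0 : Int) :: List.replicate t.length 0).set pre.length
        (if d.1 == ci then cs else cs + 1)
        = (pre ++ [if d.1 == ci then cs else cs + 1]) ++ List.replicate t.length 0 := by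
      rw [List.set_append_right _ _ (le_refl _)]
      simp
    rw [hset]
    have := ih (if d.1 == ci then cs else cs + 1) d.2 (pre ++ [if d.1 == ci then cs else cs + 1])
    simp only [List.length_append, List.length_singleton] at this
    rw [this]
    simp

-- A's fold writes pvG into the buffer starting at the enumeration offset
theorem pvA_loop (l : List (Int × Int)) :
    ∀ (k : Nat) (m : List Int) (cs ci : Int),
      ((PySem.List.enumerate l (k : Int)).foldl
        (fun (st : List Int × Int × Int) (p : Int × (Int × Int)) =>
          let m := st.1; let cs := st.2.1; let ci := st.2.2
          let idx := p.1; let disco := p.2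
          if disco.1 == ci then (m.set idx.toNat cs, cs, disco.2)
          else (m.set idx.toNat (cs + 1), cs + 1, disco.2))
        (m, cs, ci)).1 = pvOverwrite m k (pvG l cs ci) := by
  induction l with
  | nil => intro k m cs ci; simp [PySem.List.enumerate_nil, pvG, pvOverwrite]
  | cons d t ih =>
    intro k m cs ci
    rw [PySem.List.enumerate_cons]
    simp only [List.foldl_cons]
    by_cases h : d.1 == ci
    · simp only [h, if_true]
      have : ((k : Int) + 1) = ((k + 1 : Nat) : Int) := by push_cast; ring
      rw [this, ih (k + 1)]
      simp [pvG, pvOverwrite, h, Int.toNat_natCast]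
    · simp only [h]
      have : ((k : Int) + 1) = ((k + 1 : Nat) : Int) := by push_cast; ring
      rw [this, ih (k + 1)]
      simp [pvG, pvOverwrite, h, Int.toNat_natCast]

-- B's cut list is pvCuts
theorem pvB_cuts (l : List (Int × Int)) :
    ∀ (ci k : Int),
      (((PySem.List.enumerate (l.zip (ci :: l.dropLast.map (·.2))) k).filter
        (fun p => p.2.1.1 != p.2.2)).map (·.1)) = pvCuts l ci k := by
  induction l with
  | nil => intro ci k; simp [PySem.List.enumerate_nil, pvCuts]
  | cons d t ih =>
    intro ci k
    cases t with
    | nil =>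
      rw [show (d :: ([] : List (Int × Int))).dropLast = [] from rfl]
      simp only [List.map_nil, List.zip_cons_cons, List.zip_nil_left]
      rw [PySem.List.enumerate_cons, PySem.List.enumerate_nil]
      by_cases h : d.1 == ci
      · simp [List.filter, pvCuts, bne, h]
      · simp [List.filter, pvCuts, bne, h]
    | cons e u =>
      rw [List.dropLast_cons₂, List.map_cons, List.zip_cons_cons, PySem.List.enumerate_cons,
          List.filter_cons]
      by_cases h : d.1 == ci
      · have hb : ((fun (p : Int × ((Int × Int) × Int)) => p.2.1.1 != p.2.2) (k, d, ci)) = false := by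
          simp [bne, h]
        simp only [hb, if_false, Bool.false_eq_true]
        rw [ih d.2 (k + 1)]
        simp [pvCuts, h]
      · have hb : ((fun (p : Int × ((Int × Int) × Int)) => p.2.1.1 != p.2.2) (k, d, ci)) = true := by
          simp [bne, h]
        simp only [hb, if_true, List.map_cons]
        rw [ih d.2 (k + 1)]
        simp [pvCuts, h]

-- B's fold over enumerated consecutive-bounds pairs is pvJoin
theorem pvB_join (bounds : List Int) :
    ∀ (k : Nat) (acc : List Int),
      ((PySem.List.enumerate (bounds.zip (bounds.drop 1)) (k : Int)).foldl
        (fun (out : List Int) (p : Int × (Int × Int)) =>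
          out ++ List.replicate (p.2.2 - p.2.1).toNat p.1) acc)
        = acc ++ pvJoin bounds k := by
  induction bounds with
  | nil => intro k acc; simp [PySem.List.enumerate_nil, pvJoin]
  | cons a rest ih =>
    intro k acc
    cases rest with
    | nil => simp [PySem.List.enumerate_nil, pvJoin]
    | cons b rest' =>
      simp only [List.drop_one, List.tail_cons, List.zip_cons_cons]
      rw [PySem.List.enumerate_cons]
      simp only [List.foldl_cons]
      have h1 : ((k : Int) + 1) = ((k + 1 : Nat) : Int) := by push_cast; ring
      have h2 : (b :: rest').zip rest' = (b :: rest').zip ((b :: rest').drop 1) := by simp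
      rw [h1, h2, ih (k + 1)]
      simp [pvJoin, List.append_assoc]

-- every cut position counted from q is at least q
theorem pvCuts_ge (l : List (Int × Int)) :
    ∀ (ci q x : Int), x ∈ pvCuts l ci q → q ≤ x := by
  induction l with
  | nil => intro ci q x h; simp [pvCuts] at h
  | cons d t ih =>
    intro ci q x h
    by_cases hd : d.1 == ci
    · simp only [pvCuts, hd, if_true] at h
      have := ih d.2 (q + 1) x h; omega
    · simp only [pvCuts, hd] at h
      rcases List.mem_cons.mp h with h | h
      · omega
      · have := ih d.2 (q + 1) x h; omega

-- peel one position off the leading block when all later bounds exceed it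
theorem pvJoin_peel (X : List Int) (e c p : Int)
    (hX : ∀ x ∈ X, p + 1 ≤ x) (he : p + 1 ≤ e) :
    pvJoin (p :: (X ++ [e])) c = c :: pvJoin ((p + 1) :: (X ++ [e])) c := by
  cases X with
  | nil =>
    simp only [List.nil_append, pvJoin]
    have h : (e - p).toNat = (e - (p + 1)).toNat + 1 := by omega
    rw [h, List.replicate_succ]
    simp
  | cons x xs =>
    have hx : p + 1 ≤ x := hX x (List.mem_cons_self)
    simp only [List.cons_append, pvJoin]
    have h : (x - p).toNat = (x - (p + 1)).toNat + 1 := by omega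
    rw [h, List.replicate_succ]
    rfl

-- the cut-block decomposition computes the reference recursion
theorem pvJoin_cuts (l : List (Int × Int)) :
    ∀ (ci c p : Int),
      pvJoin (p :: (pvCuts l ci p ++ [p + l.length])) c = pvG l c ci := by
  induction l with
  | nil => intro ci c p; simp [pvCuts, pvG, pvJoin]
  | cons d t ih =>
    intro ci c p
    have hlen : (p : Int) + (d :: t).length = (p + 1) + t.length := by
      simp; ring
    have hge : ∀ x ∈ pvCuts t d.2 (p + 1), p + 1 ≤ x :=
      fun x hx => pvCuts_ge t d.2 (p + 1) x hx
    by_cases h : d.1 == ci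
    · simp only [pvCuts]
      rw [if_pos h, hlen, pvJoin_peel _ _ c p hge (by omega), ih d.2 c (p + 1)]
      simp [pvG, h]
    · simp only [pvCuts]
      rw [if_neg h]
      simp only [List.cons_append]
      have hstep : pvJoin (p :: p :: (pvCuts t d.2 (p + 1) ++ [p + 1 + t.length])) c
          = pvJoin (p :: (pvCuts t d.2 (p + 1) ++ [p + 1 + t.length])) (c + 1) := by
        simp [pvJoin]
      rw [hlen, hstep,
          pvJoin_peel (pvCuts t d.2 (p + 1)) (p + 1 + t.length) (c + 1) p hge (by omega),
          ih d.2 (c + 1) (p + 1)]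
      simp [pvG, h]

-- ===== VERDICT (by name: the statement is the Claim_ definition above) =====
theorem map_disco_to_sent_spec : Claim_equal_map_disco_to_sent := by
  intro ds _
  unfold Spec_map_disco_to_sent map_disco_to_sent map_disco_to_sent_alt
  simp only []
  have h0 : (PySem.List.enumerate ds) = PySem.List.enumerate ds ((0 : Nat) : Int) := by
    norm_num [PySem.List.enumerate]
  rw [show PySem.List.enumerate ds = PySem.List.enumerate ds ((0 : Nat) : Int) from h0,
      pvA_loop ds 0 (List.replicate ds.length 0) 0 1]
  have hfill := pvOverwrite_fill ds 0 1 []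
  simp only [List.nil_append, List.length_nil] at hfill
  rw [hfill]
  have h1 : (PySem.List.enumerate (ds.zip (1 :: ds.dropLast.map (·.2))))
      = PySem.List.enumerate (ds.zip (1 :: ds.dropLast.map (·.2))) 0 := by
    norm_num [PySem.List.enumerate]
  rw [h1, pvB_cuts ds 1 0]
  have h2 : ∀ bs : List Int, (PySem.List.enumerate (bs.zip (bs.drop 1)))
      = PySem.List.enumerate (bs.zip (bs.drop 1)) ((0 : Nat) : Int) := by
    intro bs; norm_num [PySem.List.enumerate]
  rw [h2, pvB_join _ 0 []]
  have := pvJoin_cuts ds 1 0 0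
  simp only [zero_add] at this
  simp only [Nat.cast_zero, List.nil_append]
  exact this.symm
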